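-- pv_equiv track=rewrite | github.com/Alexander-Porter/idv-login | src/debugmgr.py | _parse_firewall_rules
-- ===== SOURCE A (Python) =====
-- def _parse_firewall_rules(output):
--     """解析防火墙规则输出"""
--     rules = []
--     current_rule = {}
--
--     try:
--         lines = output.split('\n')
--         for line in lines:
--             line = line.strip()
--             if not line:
--                 if current_rule:
--                     rules.append(current_rule.copy())
--                     current_rule = {}
--                 continue
--
--             if ':' in line:
--                 key, value = line.split(':', 1)
--                 key = key.strip()
--                 value = value.strip()
--                 current_rule[key] = value
--
--         # 添加最后一个规则
--         if current_rule:
--             rules.append(current_rule)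
--
--     except Exception as e:
--         rules.append({'解析错误': str(e)})
--
--     return rules  # 返回所有规则
-- ===== SOURCE B (Python) =====
-- def _parse_firewall_rules(output):
--     """解析防火墙规则输出 — two-phase: group stripped lines into blocks, then parse each block"""
--     rules = []
--     try:
--         blocks = []
--         current = []
--         for raw in output.split('\n'):
--             s = raw.strip()
--             if s:
--                 current.append(s)
--             else:
--                 blocks.append(current)
--                 current = []
--         blocks.append(current)
--         for block in blocks:
--             rule = {}
--             for line in block:
--                 if ':' in line:
--                     key, value = line.split(':', 1)
--                     rule[key.strip()] = value.strip()
--             if rule: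
--                 rules.append(rule)
--     except Exception as e:
--         rules.append({'解析错误': str(e)})
--     return rules
-- ===== Notes on version B (the rewrite author's own statement) =====
-- stated objective: alternative
-- what changed: B replaces A's single pass with a flush-on-blank dict accumulator by a two-phase decomposition: first group stripped lines into blank-separated blocks, then build one dict per block and keep the non-empty ones.
import Mathlib
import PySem

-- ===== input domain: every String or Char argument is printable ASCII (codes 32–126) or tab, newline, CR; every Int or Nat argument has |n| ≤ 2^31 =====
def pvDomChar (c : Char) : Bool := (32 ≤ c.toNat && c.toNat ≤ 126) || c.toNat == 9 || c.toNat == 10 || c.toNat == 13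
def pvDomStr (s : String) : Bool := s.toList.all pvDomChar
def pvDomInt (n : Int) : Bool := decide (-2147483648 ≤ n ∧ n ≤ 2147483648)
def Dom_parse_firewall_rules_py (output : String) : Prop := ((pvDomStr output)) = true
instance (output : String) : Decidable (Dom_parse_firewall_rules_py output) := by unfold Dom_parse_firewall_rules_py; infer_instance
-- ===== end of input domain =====

-- B regroups the parse as two phases (group stripped lines into blank-separated blocks, then
-- build one dict per block) instead of A's single pass with a flush-on-blank accumulator;
-- objective: alternative decomposition, same cost. The except-branch of both Pythons is
-- unreachable for a string argument, so the ports carry only the try body.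

-- ===== PORT A =====
-- one iteration of A's loop; state = (rules so far, current_rule)
def pfrLineA (acc : List (List (String × String)) × PySem.Dict String String) (raw : String) :
    List (List (String × String)) × PySem.Dict String String :=
  let line := PySem.Str.strip raw
  if line = "" then
    (if acc.2.items = [] then acc else (acc.1 ++ [acc.2.items], PySem.Dict.empty))
  else if PySem.Str.isIn ":" line then
    match PySem.Str.splitMax? line ":" 1 with
    | some (k :: v :: _) =>
        (acc.1, acc.2.insert (PySem.Str.strip k) (PySem.Str.strip v))
    | _ => acc   -- unreachable: split on a present separator yields two pieces
  else acc

def parse_firewall_rules_py (output : String) : List (List (String × String)) :=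
  let st := ((PySem.Str.split? output "\n").getD []).foldl pfrLineA ([], PySem.Dict.empty)
  if st.2.items = [] then st.1 else st.1 ++ [st.2.items]

-- ===== PORT B =====
-- phase 1: group the stripped lines into blocks separated by blank lines
def pfrGroup (acc : List (List String) × List String) (raw : String) :
    List (List String) × List String :=
  let s := PySem.Str.strip raw
  if s = "" then (acc.1 ++ [acc.2], []) else (acc.1, acc.2 ++ [s])

-- phase 2: one dict from the ':'-lines of a block
def pfrDict (block : List String) : PySem.Dict String String :=
  block.foldl (fun rule line =>
    if PySem.Str.isIn ":" line then
      match PySem.Str.splitMax? line ":" 1 with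
      | some (k :: v :: _) =>
          rule.insert (PySem.Str.strip k) (PySem.Str.strip v)
      | _ => rule
    else rule) PySem.Dict.empty

def parse_firewall_rules_py_alt (output : String) : List (List (String × String)) :=
  let g := ((PySem.Str.split? output "\n").getD []).foldl pfrGroup ([], [])
  (g.1 ++ [g.2]).foldl (fun rules block =>
    let rule := pfrDict block
    if rule.items = [] then rules else rules ++ [rule.items]) []

-- ===== PRECONDITION & SPEC =====
def Spec_parse_firewall_rules_py (output : String) (out : List (List (String × String))) : Prop := out = parse_firewall_rules_py_alt output
instance (output : String) (out : List (List (String × String))) : Decidable (Spec_parse_firewall_rules_py output out) := by unfold Spec_parse_firewall_rules_py; infer_instance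

-- ===== CLAIM (what is proved, stated in full; the proofs are below) =====
def Claim_equal_parse_firewall_rules_py : Prop := ∀ (output : String), Dom_parse_firewall_rules_py output → Spec_parse_firewall_rules_py output (parse_firewall_rules_py output)

-- ===== LEMMAS AND PROOFS =====

-- the per-line dict update both Pythons perform on a (stripped) non-blank line
def pfrStep (rule : PySem.Dict String String) (line : String) : PySem.Dict String String :=
  if PySem.Str.isIn ":" line then
    match PySem.Str.splitMax? line ":" 1 with
    | some (k :: v :: _) =>
        rule.insert (PySem.Str.strip k) (PySem.Str.strip v)
    | _ => rule
  else rule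

-- emitting one block, B's outer-loop body
def pfrEmit (rules : List (List (String × String))) (block : List String) :
    List (List (String × String)) :=
  if (pfrDict block).items = [] then rules else rules ++ [(pfrDict block).items]

lemma pfrDict_eq_foldl (block : List String) :
    pfrDict block = block.foldl pfrStep PySem.Dict.empty := rfl

lemma pfrDict_append (bc : List String) (s : String) :
    pfrDict (bc ++ [s]) = pfrStep (pfrDict bc) s := by
  simp [pfrDict_eq_foldl, List.foldl_append]

lemma pfrLineA_blank (acc : List (List (String × String)) × PySem.Dict String String)
    (raw : String) (h : PySem.Str.strip raw = "") :
    pfrLineA acc raw =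
      (if acc.2.items = [] then acc else (acc.1 ++ [acc.2.items], PySem.Dict.empty)) := by
  simp [pfrLineA, h]

lemma pfrLineA_nonblank (acc : List (List (String × String)) × PySem.Dict String String)
    (raw : String) (h : ¬ PySem.Str.strip raw = "") :
    pfrLineA acc raw = (acc.1, pfrStep acc.2 (PySem.Str.strip raw)) := by
  simp only [pfrLineA, pfrStep, h, if_false]
  split <;> rename_i h2
  · split <;> rfl
  · rfl

lemma pfrGroup_blank (acc : List (List String) × List String)
    (raw : String) (h : PySem.Str.strip raw = "") :
    pfrGroup acc raw = (acc.1 ++ [acc.2], []) := by simp [pfrGroup, h]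

lemma pfrGroup_nonblank (acc : List (List String) × List String)
    (raw : String) (h : ¬ PySem.Str.strip raw = "") :
    pfrGroup acc raw = (acc.1, acc.2 ++ [PySem.Str.strip raw]) := by
  simp [pfrGroup, h]

-- the blocks accumulator of phase 1 is a pure prefix: it can be factored out
lemma pfrGroup_factor (lines : List String) (blocks : List (List String)) (bc : List String) :
    lines.foldl pfrGroup (blocks, bc)
      = (blocks ++ (lines.foldl pfrGroup ([], bc)).1, (lines.foldl pfrGroup ([], bc)).2) := by
  induction lines generalizing blocks bc with
  | nil => simp
  | cons raw rest ih =>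
    by_cases h : PySem.Str.strip raw = ""
    · rw [List.foldl_cons, List.foldl_cons, pfrGroup_blank _ _ h, pfrGroup_blank _ _ h]
      simp [ih (blocks ++ [bc]) [], ih [bc] []]
    · rw [List.foldl_cons, List.foldl_cons, pfrGroup_nonblank _ _ h, pfrGroup_nonblank _ _ h]
      simpa using ih blocks (bc ++ [PySem.Str.strip raw])

lemma empty_of_items_nil (d : PySem.Dict String String) (h : d.items = []) :
    d = PySem.Dict.empty := by
  apply PySem.Dict.ext
  simpa using h

-- main invariant: A's remaining loop from state (rules, pfrDict bc) computes what B computes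
-- from group-state ([], bc) with `rules` already emitted
lemma pfr_main (lines : List String) (rules : List (List (String × String))) (bc : List String) :
    (let st := lines.foldl pfrLineA (rules, pfrDict bc)
     if st.2.items = [] then st.1 else st.1 ++ [st.2.items])
    = ((lines.foldl pfrGroup ([], bc)).1 ++ [(lines.foldl pfrGroup ([], bc)).2]).foldl
        pfrEmit rules := by
  induction lines generalizing rules bc with
  | nil => simp [pfrEmit]
  | cons raw rest ih =>
    by_cases h : PySem.Str.strip raw = ""
    · rw [List.foldl_cons, List.foldl_cons, pfrLineA_blank _ _ h, pfrGroup_blank _ _ h]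
      rw [pfrGroup_factor rest (([] : List (List String)) ++ [bc]) []]
      by_cases hi : (pfrDict bc).items = []
      · have hbc : pfrDict bc = pfrDict [] := by
          rw [empty_of_items_nil _ hi]; rfl
        simp only [hi, if_true, List.nil_append, List.append_assoc, List.foldl_append,
          List.foldl_cons, List.foldl_nil]
        have he : pfrEmit rules bc = rules := by simp [pfrEmit, hi]
        rw [hbc]
        simpa [pfrEmit, hi] using ih rules []
      · have he : pfrEmit rules bc = rules ++ [(pfrDict bc).items] := by simp [pfrEmit, hi]
        simp only [hi, if_false, List.nil_append, List.append_assoc, List.foldl_append,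
          List.foldl_cons, List.foldl_nil]
        have hd : (PySem.Dict.empty : PySem.Dict String String) = pfrDict [] := rfl
        rw [hd]
        simpa [pfrEmit, hi] using ih (rules ++ [(pfrDict bc).items]) []
    · rw [List.foldl_cons, List.foldl_cons, pfrLineA_nonblank _ _ h, pfrGroup_nonblank _ _ h]
      have : pfrStep (rules, pfrDict bc).2 (PySem.Str.strip raw) = pfrDict (bc ++ [PySem.Str.strip raw]) := by
        rw [pfrDict_append]
      rw [this]
      simpa using ih rules (bc ++ [PySem.Str.strip raw])

-- ===== VERDICT (by name: the statement is the Claim_ definition above) =====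
theorem parse_firewall_rules_py_spec : Claim_equal_parse_firewall_rules_py := by
  intro output _
  unfold Spec_parse_firewall_rules_py parse_firewall_rules_py parse_firewall_rules_py_alt
  have h := pfr_main ((PySem.Str.split? output "\n").getD []) [] []
  simpa [pfrDict, pfrEmit] using h
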